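-- pv_equiv track=rewrite | github.com/polinakrusteva/HackBulgaria | Week1/3-The-Final-Round/TheFinalRound.py | take_same
-- ===== SOURCE A (Python) =====
-- def take_same(items):
--     first = items[0]
--     n = len(items)
--     index = 1
--     result = [first]
--
--     while index < n and items[index] == first:
--         result.append(items[index])
--         index += 1
--
--     return result
-- ===== SOURCE B (Python) =====
-- def take_same(items):
--     first = items[0]
--     for i in range(1, len(items)):
--         if items[i] != first:
--             return items[:i]
--     return items[:]
-- ===== Notes on version B (the rewrite author's own statement) =====
-- stated objective: faster
-- what changed: B finds the first mismatch index and returns the run with a single slice (or a copy of the whole list), instead of appending matching elements one by one to an accumulator; the bulk slice is a constant-factor win over per-element appends.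
import Mathlib
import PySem

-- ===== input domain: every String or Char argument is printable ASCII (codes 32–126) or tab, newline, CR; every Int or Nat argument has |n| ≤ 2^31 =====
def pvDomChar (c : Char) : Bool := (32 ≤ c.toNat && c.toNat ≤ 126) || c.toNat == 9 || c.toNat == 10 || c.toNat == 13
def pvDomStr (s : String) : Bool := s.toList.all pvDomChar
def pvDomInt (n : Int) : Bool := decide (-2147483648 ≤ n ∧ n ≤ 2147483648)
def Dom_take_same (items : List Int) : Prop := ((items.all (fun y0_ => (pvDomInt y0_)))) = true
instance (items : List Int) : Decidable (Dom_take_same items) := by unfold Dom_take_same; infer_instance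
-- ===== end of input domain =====

-- B returns the leading run with one slice instead of appending element by element; on the empty list both raise IndexError (excluded by Pre_).

-- ===== PORT A =====
-- while index < n and items[index] == first: result.append(items[index]); index += 1
def takeSameLoopA (items : List Int) (first : Int) (fuel : Nat) (index : Nat)
    (result : List Int) : List Int :=
  match fuel with
  | 0 => result
  | fuel + 1 =>
    if index < items.length ∧ items.getD index 0 = first then
      takeSameLoopA items first fuel (index + 1) (result ++ [items.getD index 0])
    else result

def take_same (items : List Int) : List Int :=
  match PySem.List.pyGet? items 0 with
  | none => []   -- IndexError in Python; excluded by Pre_take_same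
  | some first => takeSameLoopA items first items.length 1 [first]

-- ===== PORT B =====
-- for i in range(1, len(items)): if items[i] != first: return items[:i]; return items[:]
def takeSameLoopB (items : List Int) (first : Int) : List Nat → List Int
  | [] => items
  | i :: rest =>
    if items.getD i 0 ≠ first then items.take i
    else takeSameLoopB items first rest

def take_same_alt (items : List Int) : List Int :=
  match PySem.List.pyGet? items 0 with
  | none => []   -- IndexError in Python; excluded by Pre_take_same
  | some first => takeSameLoopB items first (List.range' 1 (items.length - 1))

-- ===== PRECONDITION & SPEC =====
-- Pre_ excludes only the empty list, on which subscripting the first element raises IndexError in both A and B.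
def Pre_take_same (items : List Int) : Prop := items ≠ []
instance (items : List Int) : Decidable (Pre_take_same items) := by unfold Pre_take_same; infer_instance
def pvWitness_take_same : List Int := [3, 3, 1]

def Spec_take_same (items : List Int) (out : List Int) : Prop := out = take_same_alt items
instance (items : List Int) (out : List Int) : Decidable (Spec_take_same items out) := by unfold Spec_take_same; infer_instance

-- ===== CLAIM (what is proved, stated in full; the proofs are below) =====
def Claim_equal_take_same : Prop := ∀ (items : List Int), Dom_take_same items → Pre_take_same items → Spec_take_same items (take_same items)

-- ===== LEMMAS AND PROOFS =====

-- A's loop, started at index k+1 inside first :: rest, appends exactly the leading equal run of rest.drop k.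
theorem takeSameLoopA_spec (first : Int) (rest : List Int) (fuel k : Nat) (result : List Int)
    (hfuel : rest.length - k ≤ fuel) :
    takeSameLoopA (first :: rest) first fuel (k + 1) result
      = result ++ (rest.drop k).takeWhile (fun x => x == first) := by
  induction fuel generalizing k result with
  | zero =>
    have : rest.length ≤ k := by omega
    simp [takeSameLoopA, List.drop_eq_nil_of_le this]
  | succ fuel ih =>
    by_cases hk : k < rest.length
    · have hdrop : rest.drop k = rest[k] :: rest.drop (k + 1) :=
        List.drop_eq_getElem_cons hk
      have hgetD : (first :: rest).getD (k + 1) 0 = rest[k] := by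
        simp [List.getD, List.getElem?_cons_succ, List.getElem?_eq_getElem hk]
      by_cases heq : rest[k] = first
      · rw [takeSameLoopA]
        have hcond : k + 1 < (first :: rest).length ∧ (first :: rest).getD (k + 1) 0 = first := by
          constructor
          · simp; omega
          · rw [hgetD, heq]
        rw [if_pos hcond, hgetD, heq]
        rw [ih (k + 1) _ (by omega)]
        rw [hdrop, heq]
        simp [List.takeWhile]
      · rw [takeSameLoopA]
        have hcond : ¬ (k + 1 < (first :: rest).length ∧ (first :: rest).getD (k + 1) 0 = first) := by
          rw [hgetD]; intro h; exact heq h.2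
        rw [if_neg hcond, hdrop]
        have hb : (rest[k] == first) = false := beq_eq_false_iff_ne.mpr heq
        simp [List.takeWhile, hb]
    · have : rest.length ≤ k := by omega
      rw [takeSameLoopA]
      have hcond : ¬ (k + 1 < (first :: rest).length ∧ (first :: rest).getD (k + 1) 0 = first) := by
        intro h; simp at h; omega
      rw [if_neg hcond]
      simp [List.drop_eq_nil_of_le this]

-- B's loop over indices k+1 … rest.length returns the prefix take (k+1) followed by the equal run of rest.drop k.
theorem takeSameLoopB_spec (first : Int) (rest : List Int) (k : Nat) (hk : k ≤ rest.length) :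
    takeSameLoopB (first :: rest) first (List.range' (k + 1) (rest.length - k))
      = (first :: rest).take (k + 1) ++ (rest.drop k).takeWhile (fun x => x == first) := by
  induction hn : rest.length - k generalizing k with
  | zero =>
    have : rest.length ≤ k := by omega
    have hk' : k = rest.length := le_antisymm hk this
    simp [takeSameLoopB, List.drop_eq_nil_of_le this,
      List.take_of_length_le (by simp [hk'] : (first :: rest).length ≤ k + 1)]
  | succ n ih =>
    have hk2 : k < rest.length := by omega
    have hdrop : rest.drop k = rest[k] :: rest.drop (k + 1) :=
      List.drop_eq_getElem_cons hk2
    have hgetD : (first :: rest).getD (k + 1) 0 = rest[k] := by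
      simp [List.getD, List.getElem?_cons_succ, List.getElem?_eq_getElem hk2]
    rw [List.range'_succ, takeSameLoopB]
    by_cases heq : rest[k] = first
    · rw [if_neg (by rw [hgetD]; simpa using heq)]
      rw [ih (k + 1) (by omega) (by omega)]
      rw [hdrop]
      have htake : (first :: rest).take (k + 1 + 1)
          = (first :: rest).take (k + 1) ++ [rest[k]] := by
        rw [List.take_add_one]
        simp [List.getElem?_cons_succ, List.getElem?_eq_getElem hk2]
      rw [htake, heq]
      simp [List.takeWhile]
    · rw [if_pos (by rw [hgetD]; simpa using heq)]
      rw [hdrop]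
      have hb : (rest[k] == first) = false := beq_eq_false_iff_ne.mpr heq
      simp [List.takeWhile, hb]

-- ===== VERDICT (by name: the statement is the Claim_ definition above) =====
theorem take_same_spec : Claim_equal_take_same := by
  intro items _ hpre
  match items with
  | [] => exact absurd rfl hpre
  | first :: rest =>
    unfold Spec_take_same take_same take_same_alt
    have hget : PySem.List.pyGet? (first :: rest) 0 = some first := by
      simp [PySem.List.pyGet?, PySem.List.pyIdx?]
    rw [hget]
    show takeSameLoopA (first :: rest) first (first :: rest).length 1 [first]
      = takeSameLoopB (first :: rest) first (List.range' 1 ((first :: rest).length - 1))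
    have hA := takeSameLoopA_spec first rest (first :: rest).length 0 [first] (by simp)
    have hB := takeSameLoopB_spec first rest 0 (Nat.zero_le _)
    simp only [Nat.zero_add, List.drop_zero, List.length_cons, 
      Nat.sub_zero, List.take_succ_cons, List.take_zero] at hA hB
    simp only [List.length_cons, Nat.add_sub_cancel]
    rw [hA, hB]
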